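/-
  THE CONTRACTS OF libc (c/libc.c; design/CONTRACTS.md entries 10, 22, 23, 26, 36, 77, 80, 81, 91): `Spec`s over the shadow
  layer only. Ghost parameters of every Spec: `others`, `frames` — the live objects of the shadow invariant.
-/
import Vorbis.Spec.Basic
namespace Vorbis.Spec
open X86 X86.User Asan

/-- **`memset(rdi = d, esi = c, rdx = n)`** (CONTRACTS 23): `n = 0`, or the `n` bytes at `d` lie inside one live object.
Returns `d`; every byte of `[d, d + n)` is `c & 0xFF`; nothing else is written but its own 64 bytes of stack (five pushes, the
return address of its check call, that routine's worst case); no shadow byte is written. -/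
def memset.spec (others : List Obj) (frames : List (Nat × FrameLayout)) : Spec where
  pre u :=
    ShadowPre others frames u ∧
    ((u.reg .rdx).toNat = 0 ∨ LiveIn others frames (u.reg .rdi).toNat (u.reg .rdx).toNat)
  post u v :=
    v.reg .rax = u.reg .rdi ∧
    ShadowUntouched u.mem v.mem ∧
    ∀ i, i < (u.reg .rdx).toNat → v.mem.readLE (u.reg .rdi + UInt64.ofNat i) 1 = (u.reg .rsi).toNat % 256
  frame := 64
  writes u := [⟨(u.reg .rdi).toNat, (u.reg .rdi).toNat + (u.reg .rdx).toNat⟩]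

@[vspec] theorem memset.spec_frame (others : List Obj) (frames : List (Nat × FrameLayout)) :
    (memset.spec others frames).frame = 64 := id rfl

@[vspec] theorem memset.spec_writes (others : List Obj) (frames : List (Nat × FrameLayout)) (u : State) :
    (memset.spec others frames).writes u = [⟨(u.reg .rdi).toNat, (u.reg .rdi).toNat + (u.reg .rdx).toNat⟩] := id rfl

/-- **`memcpy(rdi = d, rsi = s, rdx = n)`** (CONTRACTS 22): `n = 0`, or the source and the destination each lie inside one live
object and an overlap, if any, is harmless for an ascending byte copy (`d ≤ s`, or the two ranges do not meet: CONTRACTS says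
"no overlap with d > s is asked for by any caller"; the stated post is FALSE without it, so it is part of the pre here).
Returns `d`; `d[i] = old s[i]` for `i < n`; nothing else is written but its own 80 bytes of stack; no shadow byte is written. -/
def memcpy.spec (others : List Obj) (frames : List (Nat × FrameLayout)) : Spec where
  pre u :=
    ShadowPre others frames u ∧
    ((u.reg .rdx).toNat = 0 ∨
      (LiveIn others frames (u.reg .rsi).toNat (u.reg .rdx).toNat ∧
       LiveIn others frames (u.reg .rdi).toNat (u.reg .rdx).toNat ∧
       ((u.reg .rdi).toNat ≤ (u.reg .rsi).toNat ∨ (u.reg .rsi).toNat + (u.reg .rdx).toNat ≤ (u.reg .rdi).toNat)))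
  post u v :=
    v.reg .rax = u.reg .rdi ∧
    ShadowUntouched u.mem v.mem ∧
    ∀ i, i < (u.reg .rdx).toNat →
      v.mem.readLE (u.reg .rdi + UInt64.ofNat i) 1 = u.mem.readLE (u.reg .rsi + UInt64.ofNat i) 1
  frame := 80
  writes u := [⟨(u.reg .rdi).toNat, (u.reg .rdi).toNat + (u.reg .rdx).toNat⟩]

@[vspec] theorem memcpy.spec_frame (others : List Obj) (frames : List (Nat × FrameLayout)) :
    (memcpy.spec others frames).frame = 80 := id rfl

@[vspec] theorem memcpy.spec_writes (others : List Obj) (frames : List (Nat × FrameLayout)) (u : State) :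
    (memcpy.spec others frames).writes u = [⟨(u.reg .rdi).toNat, (u.reg .rdi).toNat + (u.reg .rdx).toNat⟩] := id rfl

end Vorbis.Spec
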